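-- pv_equiv track=rewrite | github.com/colinaardsma/gsa | projections/helpers/data_analysis.py | order_batting_pos_by_scarcity
-- ===== SOURCE A (Python) =====
-- def order_batting_pos_by_scarcity(league_batting_roster_pos):
--     """Order league specific roster batting positions based on position scarcity\n
--     Args:\n
--         league_batting_roster_pos: Yahoo! league roster batting positions.\n
--     Returns:\n
--         ordered list of league roster positions based on scarcity.\n
--     Raises:\n
--         None.
--     """
--     scarcity_order = ["C", "SS", "2B", "MI", "3B", "1B", "CI",
--                       "IF", "CF", "LF", "RF", "OF", "Util"]
--     ordered_roster_pos_list = []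
--     for pos in scarcity_order:
--         while pos in league_batting_roster_pos:
--             ordered_roster_pos_list.append(pos)
--             league_batting_roster_pos.remove(pos)
--     return ordered_roster_pos_list
-- ===== SOURCE B (Python) =====
-- def order_batting_pos_by_scarcity(league_batting_roster_pos):
--     """Emit each scarcity position count-many times; no removal loop.
--     Like the original, strips all scarcity positions from the argument in place."""
--     scarcity_order = ["C", "SS", "2B", "MI", "3B", "1B", "CI",
--                       "IF", "CF", "LF", "RF", "OF", "Util"]
--     ordered = [pos for pos in scarcity_order
--                for _ in range(league_batting_roster_pos.count(pos))]
--     league_batting_roster_pos[:] = [pos for pos in league_batting_roster_pos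
--                                     if pos not in scarcity_order]
--     return ordered
-- ===== Notes on version B (the rewrite author's own statement) =====
-- stated objective: simpler
-- what changed: Replaces A's nested destructive scans (for each scarcity position, a while loop of 'in' membership tests plus list.remove calls mutating the roster) with a non-destructive count-and-replicate comprehension, and strips the argument with one filter instead of repeated removes.
import Mathlib
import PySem

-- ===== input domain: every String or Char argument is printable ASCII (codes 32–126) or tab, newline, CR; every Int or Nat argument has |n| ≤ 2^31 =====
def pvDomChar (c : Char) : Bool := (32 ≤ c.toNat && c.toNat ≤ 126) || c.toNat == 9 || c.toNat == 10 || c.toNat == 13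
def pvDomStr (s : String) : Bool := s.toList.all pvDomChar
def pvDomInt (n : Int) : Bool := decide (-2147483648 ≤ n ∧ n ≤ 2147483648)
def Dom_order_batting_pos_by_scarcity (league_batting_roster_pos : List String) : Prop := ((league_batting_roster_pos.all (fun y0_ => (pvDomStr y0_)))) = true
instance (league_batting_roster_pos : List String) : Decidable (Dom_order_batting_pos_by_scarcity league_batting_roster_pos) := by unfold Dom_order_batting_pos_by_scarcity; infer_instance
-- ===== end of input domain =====

-- B replaces A's nested destructive membership-test/remove scans with a non-destructive
-- count-and-replicate comprehension. Both mutate the Python argument (stripping scarcity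
-- positions); the equivalence proved here is about the RETURN value only.

-- ===== PORT A =====
-- inner 'while pos in league_batting_roster_pos: append; remove'
def pvAWhile (pos : String) (roster : List String) (acc : List String) :
    List String × List String :=
  if h : pos ∈ roster then
    pvAWhile pos ((PySem.List.remove? roster pos).getD roster) (acc ++ [pos])
  else (acc, roster)
termination_by roster.length
decreasing_by
  rw [PySem.List.remove?_eq_some_erase roster pos h, Option.getD_some]
  have h1 := List.length_erase_of_mem h
  have h2 := List.length_pos_of_mem h
  omega

def order_batting_pos_by_scarcity (league_batting_roster_pos : List String) : List String :=
  let scarcity_order := ["C", "SS", "2B", "MI", "3B", "1B", "CI",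
                         "IF", "CF", "LF", "RF", "OF", "Util"]
  (scarcity_order.foldl
    (fun st pos => pvAWhile pos st.2 st.1)
    (([] : List String), league_batting_roster_pos)).1

-- ===== PORT B =====
def order_batting_pos_by_scarcity_alt (league_batting_roster_pos : List String) : List String :=
  let scarcity_order := ["C", "SS", "2B", "MI", "3B", "1B", "CI",
                         "IF", "CF", "LF", "RF", "OF", "Util"]
  scarcity_order.flatMap
    (fun pos =>
      (PySem.List.pyRange 0 (PySem.List.count league_batting_roster_pos pos) 1).map
        (fun _ => pos))

-- ===== PRECONDITION & SPEC =====
def Spec_order_batting_pos_by_scarcity (league_batting_roster_pos : List String) (out : List String) : Prop := out = order_batting_pos_by_scarcity_alt league_batting_roster_pos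
instance (league_batting_roster_pos : List String) (out : List String) : Decidable (Spec_order_batting_pos_by_scarcity league_batting_roster_pos out) := by unfold Spec_order_batting_pos_by_scarcity; infer_instance

-- ===== CLAIM (what is proved, stated in full; the proofs are below) =====
def Claim_equal_order_batting_pos_by_scarcity : Prop := ∀ (league_batting_roster_pos : List String), Dom_order_batting_pos_by_scarcity league_batting_roster_pos → Spec_order_batting_pos_by_scarcity league_batting_roster_pos (order_batting_pos_by_scarcity league_batting_roster_pos)

-- ===== LEMMAS AND PROOFS =====

-- repeated erase of pos does not change the pos-free filter
theorem pv_filter_ne_erase (pos : String) (roster : List String) :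
    (roster.erase pos).filter (fun x => x != pos) = roster.filter (fun x => x != pos) := by
  induction roster with
  | nil => simp
  | cons x xs ih =>
    by_cases hx : x = pos
    · subst hx; simp
    · simp [hx, ih]

-- the while-loop appends count-many copies and leaves the pos-free remainder
theorem pvAWhile_eq (pos : String) (roster acc : List String) :
    pvAWhile pos roster acc =
      (acc ++ List.replicate (roster.count pos) pos,
       roster.filter (fun x => x != pos)) := by
  induction hn : roster.length using Nat.strong_induction_on generalizing roster acc with
  | _ n ih =>
  by_cases h : pos ∈ roster
  · rw [pvAWhile.eq_def, dif_pos h, PySem.List.remove?_eq_some_erase roster pos h, Option.getD_some]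
    have hlen : (roster.erase pos).length < n := by
      have h1 := List.length_erase_of_mem h
      have h2 := List.length_pos_of_mem h
      omega
    rw [ih _ hlen _ _ rfl]
    have hc : 0 < roster.count pos := List.count_pos_iff.mpr h
    rw [List.count_erase_self, pv_filter_ne_erase]
    have h1 : roster.count pos - 1 + 1 = roster.count pos := by omega
    rw [List.append_assoc, List.singleton_append, ← List.replicate_succ, h1]
  · rw [pvAWhile.eq_def, dif_neg h]
    have h0 : roster.count pos = 0 := List.count_eq_zero.mpr h
    have hf : roster.filter (fun x => x != pos) = roster := by
      apply List.filter_eq_self.mpr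
      intro a ha
      simp only [bne_iff_ne, ne_eq]
      intro hap; exact h (hap ▸ ha)
    simp [h0, hf]

-- the outer fold over distinct positions emits original counts in order
theorem pv_foldl_eq (ps : List String) (roster acc : List String) (hnd : ps.Nodup) :
    (ps.foldl (fun st pos => pvAWhile pos st.2 st.1) (acc, roster)).1 =
      acc ++ ps.flatMap (fun p => List.replicate (roster.count p) p) := by
  induction ps generalizing roster acc with
  | nil => simp
  | cons p ps ih =>
    have hnd' : ps.Nodup := hnd.of_cons
    have hp : p ∉ ps := (List.nodup_cons.mp hnd).1
    rw [List.foldl_cons]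
    rw [show pvAWhile p ((acc, roster)).2 ((acc, roster)).1 =
      (acc ++ List.replicate (roster.count p) p, roster.filter (fun x => x != p))
      from pvAWhile_eq p roster acc]
    rw [ih _ _ hnd']
    rw [List.flatMap_cons, ← List.append_assoc]
    congr 1
    apply List.flatMap_congr
    intro q hq
    have hqp : q ≠ p := fun h => hp (h ▸ hq)
    congr 1
    rw [List.count_filter]
    simp [hqp]

theorem pv_B_eq (l : List String) :
    order_batting_pos_by_scarcity_alt l =
      (["C", "SS", "2B", "MI", "3B", "1B", "CI",
        "IF", "CF", "LF", "RF", "OF", "Util"] : List String).flatMap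
        (fun p => List.replicate (l.count p) p) := by
  unfold order_batting_pos_by_scarcity_alt
  apply List.flatMap_congr
  intro p _
  rw [PySem.List.count_eq, PySem.List.pyRange_one]
  simp [Function.comp_def, List.map_const']

-- ===== VERDICT (by name: the statement is the Claim_ definition above) =====
theorem order_batting_pos_by_scarcity_spec : Claim_equal_order_batting_pos_by_scarcity := by
  intro l _
  unfold Spec_order_batting_pos_by_scarcity
  rw [pv_B_eq]
  unfold order_batting_pos_by_scarcity
  rw [pv_foldl_eq _ _ _ (by decide)]
  rfl
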